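-- pv_equiv track=rewrite | github.com/regiszhao/engsci-year1 | 1F/ESC180 - Intro to Computer Programming/Exams/midterm.py | share_n1
-- ===== SOURCE A (Python) =====
-- def switch_to_col(M):
--     new = []
--     for i in range(len(M[0])):
--         column = []
--         for j in range(len(M)):
--             column.append(M[j][i])
--         new.append(column)
--     return(new)
--
-- def share_n1(M1, M2):
--     M1_columns = switch_to_col(M1)
--     M2_columns = switch_to_col(M2)
--     num_matches = 0
--     for column in M1_columns:
--         if column in M2_columns:
--             num_matches += 1
--         if num_matches >= len(M1_columns) - 1:
--             return True
--     return False
-- ===== SOURCE B (Python) =====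
-- def share_n1(M1, M2):
--     cols1 = sorted([row[i] for row in M1] for i in range(len(M1[0])))
--     cols2 = sorted([row[i] for row in M2] for i in range(len(M2[0])))
--     i = j = 0
--     matches = 0
--     while i < len(cols1):
--         if j == len(cols2) or cols1[i] < cols2[j]:
--             i += 1
--         elif cols1[i] == cols2[j]:
--             matches += 1
--             i += 1
--         else:
--             j += 1
--     return len(cols1) >= 1 and matches >= len(cols1) - 1
-- ===== Notes on version B (the rewrite author's own statement) =====
-- stated objective: alternative
-- what changed: B replaces A's per-column linear scan of M2's column list (with an early-return match counter) by sorting both column lists once and counting shared columns in a single two-pointer merge, then deciding with the closed-form threshold matches >= width1 - 1.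
import Mathlib
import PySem

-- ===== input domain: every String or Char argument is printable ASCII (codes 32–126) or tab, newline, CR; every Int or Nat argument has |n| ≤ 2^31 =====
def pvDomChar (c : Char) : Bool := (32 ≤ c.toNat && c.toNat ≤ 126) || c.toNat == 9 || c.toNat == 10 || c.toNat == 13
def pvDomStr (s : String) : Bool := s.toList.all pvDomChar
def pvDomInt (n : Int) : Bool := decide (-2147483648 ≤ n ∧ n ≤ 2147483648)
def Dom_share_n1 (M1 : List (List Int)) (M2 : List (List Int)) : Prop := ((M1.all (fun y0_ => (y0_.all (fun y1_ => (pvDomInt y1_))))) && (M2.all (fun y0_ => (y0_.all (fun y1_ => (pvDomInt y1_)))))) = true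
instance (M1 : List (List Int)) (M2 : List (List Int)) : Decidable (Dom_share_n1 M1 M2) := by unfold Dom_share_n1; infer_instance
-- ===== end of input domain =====

-- B sorts both matrices' column lists once and counts shared columns with a single two-pointer merge, instead of A's per-column linear scans of M2's column list with an early-return counter (alternative algorithm; not measured faster).


-- ===== PORT A =====
-- switch_to_col: builds the list of columns; pyGetD defaults never fire inside Pre_ (indexes in range there)
def switch_to_col (M : List (List Int)) : List (List Int) :=
  (PySem.List.pyRange 0 (((PySem.List.pyGet? M 0).getD []).length : Int) 1).foldl
    (fun new i =>
      new ++ [(PySem.List.pyRange 0 (M.length : Int) 1).foldl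
        (fun column j => column ++ [PySem.List.pyGetD (PySem.List.pyGetD M j []) i 0]) []])
    []

-- the 'for column in M1_columns' loop with its early 'return True'
def shareLoop (cols : List (List Int)) (c2 : List (List Int)) (n : Int) (num : Int) : Bool :=
  match cols with
  | [] => false
  | c :: rest =>
    let num' := if c ∈ c2 then num + 1 else num
    if num' ≥ n - 1 then true else shareLoop rest c2 n num'

def share_n1 (M1 : List (List Int)) (M2 : List (List Int)) : Bool :=
  let M1_columns := switch_to_col M1
  let M2_columns := switch_to_col M2
  shareLoop M1_columns M2_columns (M1_columns.length : Int) 0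

-- ===== PORT B =====
-- B's while loop: two pointers over the two sorted column lists (list '<' is Lean's lex '<' on List Int)
def mergeCount (cols1 : List (List Int)) (cols2 : List (List Int)) : Int :=
  match cols1, cols2 with
  | [], _ => 0
  | _ :: a, [] => mergeCount a []
  | x :: a, y :: b =>
    if x < y then mergeCount a (y :: b)
    else if x = y then mergeCount a (y :: b) + 1
    else mergeCount (x :: a) b
termination_by (cols1.length + cols2.length)

def share_n1_alt (M1 : List (List Int)) (M2 : List (List Int)) : Bool :=
  let cols1 := PySem.List.sorted
    ((PySem.List.pyRange 0 (((PySem.List.pyGet? M1 0).getD []).length : Int) 1).map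
      (fun i => M1.map (fun row => PySem.List.pyGetD row i 0))) (fun c => c)
  let cols2 := PySem.List.sorted
    ((PySem.List.pyRange 0 (((PySem.List.pyGet? M2 0).getD []).length : Int) 1).map
      (fun i => M2.map (fun row => PySem.List.pyGetD row i 0))) (fun c => c)
  let nmatch := mergeCount cols1 cols2
  decide ((cols1.length : Int) ≥ 1 ∧ nmatch ≥ (cols1.length : Int) - 1)

-- ===== PRECONDITION & SPEC =====
-- Pre_ excludes exactly the inputs where A raises IndexError: an empty matrix (M[0]) or a row shorter than row 0 (M[j][i]).
def Pre_share_n1 (M1 : List (List Int)) (M2 : List (List Int)) : Prop :=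
  M1 ≠ [] ∧ M2 ≠ [] ∧
  (∀ row ∈ M1, (M1.headD []).length ≤ row.length) ∧
  (∀ row ∈ M2, (M2.headD []).length ≤ row.length)
instance (M1 : List (List Int)) (M2 : List (List Int)) : Decidable (Pre_share_n1 M1 M2) := by unfold Pre_share_n1; infer_instance

def pvWitness_share_n1 : List (List Int) × List (List Int) := ([[1, 2], [3, 4]], [[2, 1], [4, 3]])

def Spec_share_n1 (M1 : List (List Int)) (M2 : List (List Int)) (out : Bool) : Prop := out = share_n1_alt M1 M2
instance (M1 : List (List Int)) (M2 : List (List Int)) (out : Bool) : Decidable (Spec_share_n1 M1 M2 out) := by unfold Spec_share_n1; infer_instance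

-- ===== CLAIM (what is proved, stated in full; the proofs are below) =====
def Claim_equal_share_n1 : Prop := ∀ (M1 : List (List Int)) (M2 : List (List Int)), Dom_share_n1 M1 M2 → Pre_share_n1 M1 M2 → Spec_share_n1 M1 M2 (share_n1 M1 M2)

-- ===== LEMMAS AND PROOFS =====

-- A's double append-fold transpose equals the map of column builders over the same range.
theorem switch_to_col_eq (M : List (List Int)) :
    switch_to_col M =
      (PySem.List.pyRange 0 (((PySem.List.pyGet? M 0).getD []).length : Int) 1).map
        (fun i => M.map (fun row => PySem.List.pyGetD row i 0)) := by
  unfold switch_to_col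
  rw [PySem.List.foldl_append_singleton_eq_map]
  simp only [List.nil_append]
  apply List.map_congr_left
  intro i _
  rw [PySem.List.foldl_append_singleton_eq_map]
  simp only [List.nil_append]
  rw [show (fun j => PySem.List.pyGetD (PySem.List.pyGetD M j []) i 0)
        = (fun row => PySem.List.pyGetD row i 0) ∘ (fun j => PySem.List.pyGetD M j ([] : List Int)) from rfl,
      ← List.map_map, PySem.List.map_pyGetD_pyRange_zero']

-- shareLoop returns true iff the final match count reaches n-1 (for a nonempty column list).
theorem shareLoop_eq (c2 : List (List Int)) (n : Int) :
    ∀ cols : List (List Int), cols ≠ [] → ∀ num : Int,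
      shareLoop cols c2 n num
        = decide (num + (cols.countP (fun c => decide (c ∈ c2)) : Int) ≥ n - 1) := by
  intro cols
  induction cols with
  | nil => intro h; exact absurd rfl h
  | cons c rest ih =>
    intro _ num
    have hrest0 : (0 : Int) ≤ (rest.countP (fun c => decide (c ∈ c2)) : Int) := Int.natCast_nonneg _
    have hcnt : (((c :: rest).countP (fun c => decide (c ∈ c2)) : Nat) : Int)
        = (rest.countP (fun c => decide (c ∈ c2)) : Int) + (if c ∈ c2 then 1 else 0) := by
      by_cases hm : c ∈ c2 <;> simp [hm]
    simp only [shareLoop]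
    by_cases hge : (if c ∈ c2 then num + 1 else num) ≥ n - 1
    · rw [if_pos hge]
      symm; rw [decide_eq_true_eq, hcnt]
      split_ifs at hge ⊢ <;> omega
    · rw [if_neg hge]
      cases rest with
      | nil =>
        simp only [shareLoop]
        symm; rw [decide_eq_false_iff_not, not_le, hcnt]
        simp only [List.countP_nil, Nat.cast_zero, zero_add]
        split_ifs at hge ⊢ <;> omega
      | cons d rest' =>
        rw [ih (by simp), decide_eq_decide, hcnt]
        split_ifs <;> omega

-- sorted_pairwise restated at this file's elaborated instances (Decidable instances are subsingletons)
theorem sorted_pairwise_id (c : List (List Int)) :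
    List.Pairwise (fun u v : List Int => u ≤ v) (PySem.List.sorted c (fun x => x)) := by
  have hI : (fun a b : List Int => a.decidableLT b) = (LinearOrder.toDecidableLT : DecidableLT (List Int)) :=
    Subsingleton.elim _ _
  rw [show (PySem.List.sorted (κ := List Int) c (fun x => x))
      = @PySem.List.sorted _ _ List.instLinearOrder.toLT LinearOrder.toDecidableLT c (fun x => x) false from by
    rw [← hI]]
  exact PySem.List.sorted_pairwise c (fun x : List Int => x)

-- the sorted-merge counts exactly the elements of the first sorted list that occur in the second sorted list
theorem mergeCount_eq : ∀ (a b : List (List Int)),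
    a.Pairwise (· ≤ ·) → b.Pairwise (· ≤ ·) →
    mergeCount a b = (a.countP (fun c => decide (c ∈ b)) : Int) := by
  intro a b
  induction a, b using mergeCount.induct with
  | case1 b => intro _ _; simp [mergeCount]
  | case2 x a ih =>
    intro ha hb
    rw [mergeCount, ih (List.Pairwise.of_cons ha) hb]
    simp
  | case3 x a y b hlt ih =>
    intro ha hb
    rw [mergeCount, if_pos hlt, ih (List.Pairwise.of_cons ha) hb]
    have hx1 : ¬ x = y := fun h => absurd (h ▸ hlt) (lt_irrefl y)
    have hx2 : x ∉ b := fun h =>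
      absurd (lt_of_lt_of_le hlt ((List.pairwise_cons.mp hb).1 x h)) (lt_irrefl x)
    simp [hx1, hx2]
  | case4 a x b hnlt ih =>
    intro ha hb
    rw [mergeCount, if_neg hnlt, if_pos rfl, ih (List.Pairwise.of_cons ha) hb]
    have hx : (decide (x ∈ x :: b)) = true := by simp
    simp only [List.countP_cons, hx, if_pos]
    push_cast; ring
  | case5 x a y b hnlt hne ih =>
    intro ha hb
    have hylt : y < x := lt_of_le_of_ne (not_lt.mp hnlt) (Ne.symm hne)
    rw [mergeCount, if_neg hnlt, if_neg hne, ih ha (List.Pairwise.of_cons hb)]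
    congr 1
    apply List.countP_congr
    intro z hz
    have hyz : y < z := by
      rcases List.mem_cons.mp hz with h | h
      · exact h ▸ hylt
      · exact lt_of_lt_of_le hylt ((List.pairwise_cons.mp ha).1 z h)
    have hzy : ¬ z = y := fun h => absurd (h ▸ hyz) (lt_irrefl y)
    simp [List.mem_cons, hzy]

-- ===== VERDICT (by name: the statement is the Claim_ definition above) =====
theorem share_n1_spec : Claim_equal_share_n1 := by
  intro M1 M2 _ _
  unfold Spec_share_n1
  simp only [share_n1, share_n1_alt]
  rw [switch_to_col_eq M1, switch_to_col_eq M2]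
  set c1 : List (List Int) := (PySem.List.pyRange 0 (((PySem.List.pyGet? M1 0).getD []).length : Int) 1).map
        (fun i => M1.map (fun row => PySem.List.pyGetD row i 0)) with hc1
  set c2 : List (List Int) := (PySem.List.pyRange 0 (((PySem.List.pyGet? M2 0).getD []).length : Int) 1).map
        (fun i => M2.map (fun row => PySem.List.pyGetD row i 0)) with hc2
  have hm : mergeCount (PySem.List.sorted c1 (fun c => c)) (PySem.List.sorted c2 (fun c => c))
      = (((PySem.List.sorted c1 (fun c => c)).countP
          (fun c => decide (c ∈ PySem.List.sorted c2 (fun c => c)))) : Int) :=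
    mergeCount_eq _ _ (sorted_pairwise_id c1) (sorted_pairwise_id c2)
  rw [hm]
  have hperm1 := PySem.List.sorted_perm c1 (fun c => c) false
  have hperm2 := PySem.List.sorted_perm c2 (fun c => c) false
  have hlen : (PySem.List.sorted c1 (fun c => c)).length = c1.length := hperm1.length_eq
  have hcnt : (PySem.List.sorted c1 (fun c => c)).countP
        (fun c => decide (c ∈ PySem.List.sorted c2 (fun c => c)))
      = c1.countP (fun c => decide (c ∈ c2)) := by
    have h1 : (PySem.List.sorted c1 (fun c => c)).countP
          (fun c => decide (c ∈ PySem.List.sorted c2 (fun c => c)))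
        = (PySem.List.sorted c1 (fun c => c)).countP (fun c => decide (c ∈ c2)) :=
      List.countP_congr (fun z _ => by simp [hperm2.mem_iff])
    rw [h1]
    exact hperm1.countP_eq _
  rw [hlen, hcnt]
  by_cases hc : c1 = []
  · rw [hc]; simp [shareLoop]
  · rw [shareLoop_eq c2 _ c1 hc 0]
    have hcle : c1.countP (fun c => decide (c ∈ c2)) ≤ c1.length := List.countP_le_length
    have hpos : c1.length ≠ 0 := by simpa using hc
    rw [decide_eq_decide]
    omega
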